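-- pv_equiv track=rewrite | github.com/stephanlphilips/pulse_lib | pulse_lib/segments/data_handling_functions.py | find_common_dimension
-- ===== SOURCE A (Python) =====
-- def find_common_dimension(dim_1, dim_2):
-- 	'''
-- 	finds the union of two dimensions
-- 	Args:
-- 		dim_1 (list/tuple) : list with dimensions of a first data object
-- 		dim_2 (list/tuple) : list with dimensions of a second data object
-- 	Returns:
-- 		dim_comb (list) : the common dimensions of the of both dimensions provided
--
-- 	Will raise error is dimensions are not compatible
-- 	'''
-- 	dim_1 = list(dim_1)[::-1]
-- 	dim_2 = list(dim_2)[::-1]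
-- 	dim_comb = []
--
-- 	# estimate size of new dimension
-- 	n_dim = len(dim_1)
-- 	if len(dim_2) > n_dim:
-- 		n_dim = len(dim_2)
--
-- 	# combine both
-- 	for i in range(n_dim):
-- 		if len(dim_2) <= i:
-- 			dim_comb.append(dim_1[i])
-- 		elif len(dim_1) <= i:
-- 			dim_comb.append(dim_2[i])
-- 		else:
-- 			if dim_1[i] == dim_2[i]:
-- 				dim_comb.append(dim_2[i])
-- 			elif dim_1[i] == 1:
-- 				dim_comb.append(dim_2[i])
-- 			elif dim_2[i] == 1:
-- 				dim_comb.append(dim_1[i])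
-- 			else:
-- 				raise ValueError("Error in combining dimensions of two data objects. This error is most likely caused by looping over two variables with different dimensions along the same axis.")
--
-- 	return dim_comb[::-1]
-- ===== SOURCE B (Python) =====
-- def find_common_dimension(dim_1, dim_2):
--     d1, d2 = list(dim_1), list(dim_2)
--     if len(d1) < len(d2):
--         d1, d2 = d2, d1
--     # d1 is now the longer (or equal) list; its leading extra axes carry over verbatim,
--     # and only the right-aligned overlap needs merging -- no reversal, no padding.
--     k = len(d1) - len(d2)
--     merged = []
--     for a, b in zip(d1[k:], d2):
--         if a == b or b == 1:
--             merged.append(a)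
--         elif a == 1:
--             merged.append(b)
--         else:
--             raise ValueError("Error in combining dimensions of two data objects. This error is most likely caused by looping over two variables with different dimensions along the same axis.")
--     return d1[:k] + merged
-- ===== Notes on version B (the rewrite author's own statement) =====
-- stated objective: alternative
-- what changed: Instead of reversing both lists, padding the shorter one index-by-index with length guards and reversing the result back, B never reverses: it picks the longer list, copies its unchecked leading prefix verbatim with a slice, and merges only the right-aligned overlap with a single zip over forward-order suffixes.
import Mathlib
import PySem

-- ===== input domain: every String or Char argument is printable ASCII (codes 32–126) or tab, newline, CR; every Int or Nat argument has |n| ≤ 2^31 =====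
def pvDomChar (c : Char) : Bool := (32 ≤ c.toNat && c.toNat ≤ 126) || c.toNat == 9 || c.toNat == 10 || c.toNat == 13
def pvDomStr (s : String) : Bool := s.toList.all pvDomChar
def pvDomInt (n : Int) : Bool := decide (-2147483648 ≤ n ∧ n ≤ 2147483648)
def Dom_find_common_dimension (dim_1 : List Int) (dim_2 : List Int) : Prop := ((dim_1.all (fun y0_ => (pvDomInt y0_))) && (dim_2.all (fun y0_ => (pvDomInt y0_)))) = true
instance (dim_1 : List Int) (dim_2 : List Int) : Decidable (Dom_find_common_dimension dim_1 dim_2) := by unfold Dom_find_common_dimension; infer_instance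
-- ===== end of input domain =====

-- B drops A's reverse/pad/reverse scheme: it copies the longer list's leading prefix by a slice and zips only the right-aligned overlap in forward order; equivalence proved on broadcast-compatible inputs (Pre_ excludes exactly the ValueError inputs).


-- ===== PORT A =====
-- the for-i-in-range loop, as structural recursion on the remaining iteration count `fuel`
-- with the running index `i`; `none` = the ValueError (excluded by Pre_).
-- `getD i 0` is exact here: in every branch that reads `dim_k[i]` Python's index is in range.
def fcdLoopA (d1 : List Int) (d2 : List Int) : Nat → Nat → List Int → Option (List Int)
  | _, 0, c => some c
  | i, fuel + 1, c =>
    if d2.length ≤ i then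
      fcdLoopA d1 d2 (i + 1) fuel (c ++ [d1.getD i 0])
    else if d1.length ≤ i then
      fcdLoopA d1 d2 (i + 1) fuel (c ++ [d2.getD i 0])
    else if d1.getD i 0 = d2.getD i 0 then
      fcdLoopA d1 d2 (i + 1) fuel (c ++ [d2.getD i 0])
    else if d1.getD i 0 = 1 then
      fcdLoopA d1 d2 (i + 1) fuel (c ++ [d2.getD i 0])
    else if d2.getD i 0 = 1 then
      fcdLoopA d1 d2 (i + 1) fuel (c ++ [d1.getD i 0])
    else
      none

def find_common_dimension (dim_1 : List Int) (dim_2 : List Int) : List Int :=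
  let d1 := dim_1.reverse
  let d2 := dim_2.reverse
  let n_dim := if d2.length > d1.length then d2.length else d1.length
  match fcdLoopA d1 d2 0 n_dim [] with
  | some dim_comb => dim_comb.reverse
  | none => []          -- ValueError; outside Pre_

-- ===== PORT B =====
-- B: swap so p.1 is the longer list, copy its leading prefix d1[:k] verbatim, and merge
-- the right-aligned overlap zip(d1[k:], d2) in forward order (no reversal anywhere).
-- The slices d1[k:] / d1[:k] with 0 ≤ k ≤ len(d1) are exactly List.drop / List.take.
def find_common_dimension_alt (dim_1 : List Int) (dim_2 : List Int) : List Int :=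
  let p := if dim_1.length < dim_2.length then (dim_2, dim_1) else (dim_1, dim_2)
  let k := p.1.length - p.2.length
  let merged := ((p.1.drop k).zip p.2).foldl
    (fun acc q => acc.bind fun c =>
      if q.1 = q.2 ∨ q.2 = 1 then some (c ++ [q.1])
      else if q.1 = 1 then some (c ++ [q.2])
      else none)          -- ValueError; outside Pre_
    (some [])
  match merged with
  | some m => p.1.take k ++ m
  | none => []

-- ===== PRECONDITION & SPEC =====
-- Pre_ excludes exactly the broadcast-incompatible inputs, on which A (and B) raise ValueError.
def Pre_find_common_dimension (dim_1 : List Int) (dim_2 : List Int) : Prop :=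
  ∀ p ∈ dim_1.reverse.zip dim_2.reverse, p.1 = p.2 ∨ p.1 = 1 ∨ p.2 = 1
instance (dim_1 : List Int) (dim_2 : List Int) : Decidable (Pre_find_common_dimension dim_1 dim_2) := by unfold Pre_find_common_dimension; infer_instance
def pvWitness_find_common_dimension : List Int × List Int := ([2, 3], [1, 3])

def Spec_find_common_dimension (dim_1 : List Int) (dim_2 : List Int) (out : List Int) : Prop := out = find_common_dimension_alt dim_1 dim_2
instance (dim_1 : List Int) (dim_2 : List Int) (out : List Int) : Decidable (Spec_find_common_dimension dim_1 dim_2 out) := by unfold Spec_find_common_dimension; infer_instance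

-- ===== CLAIM (what is proved, stated in full; the proofs are below) =====
def Claim_equal_find_common_dimension : Prop := ∀ (dim_1 : List Int) (dim_2 : List Int), Dom_find_common_dimension dim_1 dim_2 → Pre_find_common_dimension dim_1 dim_2 → Spec_find_common_dimension dim_1 dim_2 (find_common_dimension dim_1 dim_2)

-- ===== LEMMAS AND PROOFS =====

-- A's per-axis merge value (for the aligned part of the reversed lists)
def fcdM (a b : Int) : Int := if a = b then b else if a = 1 then b else a

-- B's per-axis merge value (first argument from the longer list)
def fcdMB (a b : Int) : Int := if a = b ∨ b = 1 then a else b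

-- the sequence A's loop produces, on the reversed (front-aligned) lists
def fcdMerge (xs ys : List Int) : List Int :=
  List.zipWith fcdM xs ys ++ xs.drop ys.length ++ ys.drop xs.length

theorem fcdMerge_nil_right (xs : List Int) : fcdMerge xs [] = xs := by
  simp [fcdMerge]

theorem fcdMerge_nil_left (ys : List Int) : fcdMerge [] ys = ys := by
  simp [fcdMerge]

theorem fcdMerge_cons (x y : Int) (xs ys : List Int) :
    fcdMerge (x :: xs) (y :: ys) = fcdM x y :: fcdMerge xs ys := by
  simp [fcdMerge]

theorem fcdLoopA_step (d1 d2 : List Int) (i k : Nat) (c : List Int) :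
    fcdLoopA d1 d2 i (k + 1) c =
      if d2.length ≤ i then fcdLoopA d1 d2 (i + 1) k (c ++ [d1.getD i 0])
      else if d1.length ≤ i then fcdLoopA d1 d2 (i + 1) k (c ++ [d2.getD i 0])
      else if d1.getD i 0 = d2.getD i 0 then fcdLoopA d1 d2 (i + 1) k (c ++ [d2.getD i 0])
      else if d1.getD i 0 = 1 then fcdLoopA d1 d2 (i + 1) k (c ++ [d2.getD i 0])
      else if d2.getD i 0 = 1 then fcdLoopA d1 d2 (i + 1) k (c ++ [d1.getD i 0])
      else none := rfl

theorem fcdLoopA_eq_merge (d1 d2 : List Int) :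
    ∀ fuel i c, fuel = max d1.length d2.length - i →
      (∀ p ∈ (d1.drop i).zip (d2.drop i), p.1 = p.2 ∨ p.1 = 1 ∨ p.2 = 1) →
      fcdLoopA d1 d2 i fuel c = some (c ++ fcdMerge (d1.drop i) (d2.drop i)) := by
  intro fuel
  induction fuel with
  | zero =>
    intro i c hf _
    have h1 : d1.length ≤ i := by omega
    have h2 : d2.length ≤ i := by omega
    simp [fcdLoopA, List.drop_eq_nil_of_le h1, List.drop_eq_nil_of_le h2, fcdMerge]
  | succ k ih =>
    intro i c hf hc
    rw [fcdLoopA_step]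
    by_cases h2 : d2.length ≤ i
    · have h1 : i < d1.length := by omega
      have hd1 : d1.drop i = d1[i] :: d1.drop (i + 1) := List.drop_eq_getElem_cons h1
      have hd2 : d2.drop i = [] := List.drop_eq_nil_of_le h2
      have hd2' : d2.drop (i + 1) = [] := List.drop_eq_nil_of_le (by omega)
      have hget : d1.getD i 0 = d1[i] := List.getD_eq_getElem d1 0 h1
      rw [if_pos h2, ih (i+1) _ (by omega) (by rw [hd2']; simp)]
      rw [hd1, hd2, hd2', fcdMerge_nil_right, fcdMerge_nil_right, hget]
      simp
    · have h2' : i < d2.length := by omega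
      have hd2 : d2.drop i = d2[i] :: d2.drop (i + 1) := List.drop_eq_getElem_cons h2'
      have hget2 : d2.getD i 0 = d2[i] := List.getD_eq_getElem d2 0 h2'
      rw [if_neg h2]
      by_cases h1 : d1.length ≤ i
      · have hd1 : d1.drop i = [] := List.drop_eq_nil_of_le h1
        have hd1' : d1.drop (i + 1) = [] := List.drop_eq_nil_of_le (by omega)
        rw [if_pos h1, ih (i+1) _ (by omega) (by rw [hd1']; simp)]
        rw [hd1, hd1', hd2, fcdMerge_nil_left, fcdMerge_nil_left, hget2]
        simp
      · have h1' : i < d1.length := by omega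
        have hd1 : d1.drop i = d1[i] :: d1.drop (i + 1) := List.drop_eq_getElem_cons h1'
        have hget1 : d1.getD i 0 = d1[i] := List.getD_eq_getElem d1 0 h1'
        rw [if_neg h1, hget1, hget2]
        have hzip : (d1.drop i).zip (d2.drop i)
            = (d1[i], d2[i]) :: (d1.drop (i+1)).zip (d2.drop (i+1)) := by
          rw [hd1, hd2]; rfl
        have hcomp : d1[i] = d2[i] ∨ d1[i] = 1 ∨ d2[i] = 1 := by
          have := hc (d1[i], d2[i]) (by rw [hzip]; exact List.mem_cons_self)
          simpa using this
        have hc' : ∀ p ∈ (d1.drop (i+1)).zip (d2.drop (i+1)),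
            p.1 = p.2 ∨ p.1 = 1 ∨ p.2 = 1 := by
          intro p hp; exact hc p (by rw [hzip]; exact List.mem_cons_of_mem _ hp)
        have hrest := ih (i+1) (c ++ [fcdM d1[i] d2[i]]) (by omega) hc'
        have hM : fcdMerge (d1.drop i) (d2.drop i)
            = fcdM d1[i] d2[i] :: fcdMerge (d1.drop (i+1)) (d2.drop (i+1)) := by
          rw [hd1, hd2, fcdMerge_cons]
        by_cases heq : d1[i] = d2[i]
        · rw [if_pos heq, show d2[i] = fcdM d1[i] d2[i] from by simp [fcdM, heq], hrest, hM]
          simp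
        · rw [if_neg heq]
          by_cases hone1 : d1[i] = 1
          · rw [if_pos hone1,
              show d2[i] = fcdM d1[i] d2[i] from by simp [fcdM, hone1], hrest, hM]
            simp
          · have hone2 : d2[i] = 1 := by tauto
            rw [if_neg hone1, if_pos hone2,
              show d1[i] = fcdM d1[i] d2[i] from by simp [fcdM, hone1], hrest, hM]
            simp

-- zipWith truncates to the shorter list
theorem fcdZipWithTrunc {α β γ : Type} (f : α → β → γ) :
    ∀ (as : List α) (bs : List β), List.zipWith f as bs = List.zipWith f (as.take bs.length) bs := by
  intro as
  induction as with
  | nil => intro bs; simp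
  | cons a as ih =>
    intro bs
    cases bs with
    | nil => simp
    | cons b bs => simp [ih bs]

-- the reversed zip: pairs of zip(L.reverse, S.reverse) are the pairs of the
-- right-aligned forward zip, reversed (S the shorter list)
theorem fcdZipRev (L S : List Int) (h : S.length ≤ L.length) :
    L.reverse.zip S.reverse = ((L.drop (L.length - S.length)).zip S).reverse := by
  rw [List.zip_eq_zipWith, List.zip_eq_zipWith,
    fcdZipWithTrunc Prod.mk L.reverse S.reverse]
  simp only [List.length_reverse]
  rw [List.take_reverse, ← List.reverse_zipWith (by simp; omega)]

-- B's fold returns the mapped merge when every pair is compatible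
theorem fcdFoldB_eq (ps : List (Int × Int))
    (h : ∀ p ∈ ps, p.1 = p.2 ∨ p.1 = 1 ∨ p.2 = 1) :
    ∀ c, ps.foldl
      (fun acc q => acc.bind fun c =>
        if q.1 = q.2 ∨ q.2 = 1 then some (c ++ [q.1])
        else if q.1 = 1 then some (c ++ [q.2])
        else none)
      (some c)
      = some (c ++ ps.map (fun q => fcdMB q.1 q.2)) := by
  induction ps with
  | nil => intro c; simp
  | cons p ps ih =>
    intro c
    have hp := h p List.mem_cons_self
    have h' : ∀ q ∈ ps, q.1 = q.2 ∨ q.1 = 1 ∨ q.2 = 1 :=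
      fun q hq => h q (List.mem_cons_of_mem _ hq)
    by_cases hb : p.1 = p.2 ∨ p.2 = 1
    · simp only [List.foldl_cons, Option.bind_some, if_pos hb]
      rw [ih h']
      simp [fcdMB, hb]
    · have hone1 : p.1 = 1 := by tauto
      simp only [List.foldl_cons, Option.bind_some, if_neg hb, if_pos hone1]
      rw [ih h']
      simp [fcdMB, hb]

-- fcdMerge is symmetric on compatible inputs
theorem fcdMerge_comm (xs : List Int) :
    ∀ ys, (∀ p ∈ xs.zip ys, p.1 = p.2 ∨ p.1 = 1 ∨ p.2 = 1) →
      fcdMerge xs ys = fcdMerge ys xs := by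
  induction xs with
  | nil => intro ys _; rw [fcdMerge_nil_left, fcdMerge_nil_right]
  | cons x xs ih =>
    intro ys h
    cases ys with
    | nil => rw [fcdMerge_nil_left, fcdMerge_nil_right]
    | cons y ys =>
      rw [fcdMerge_cons, fcdMerge_cons,
        ih ys (fun p hp => h p (by simp [List.zip_cons_cons]; right; exact hp))]
      have hxy : x = y ∨ x = 1 ∨ y = 1 := by
        have := h (x, y) (by simp [List.zip_cons_cons])
        simpa using this
      have : fcdM x y = fcdM y x := by
        unfold fcdM
        rcases hxy with h' | h' | h' <;> subst h' <;> split_ifs <;> omega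
      rw [this]

-- fcdMerge on a longer-left pair: zip part then the tail of the longer list
theorem fcdMerge_long (rs ss : List Int) (h : ss.length ≤ rs.length) :
    fcdMerge rs ss = List.zipWith fcdM rs ss ++ rs.drop ss.length := by
  have : ss.drop rs.length = [] := List.drop_eq_nil_of_le h
  simp [fcdMerge, this]

-- the bridge: A's merged reversed sequence, reversed back, is B's prefix-plus-overlap
theorem fcdBridge (L S : List Int) (hlen : S.length ≤ L.length)
    (hc : ∀ p ∈ L.reverse.zip S.reverse, p.1 = p.2 ∨ p.1 = 1 ∨ p.2 = 1) :
    (fcdMerge L.reverse S.reverse).reverse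
      = L.take (L.length - S.length)
        ++ ((L.drop (L.length - S.length)).zip S).map (fun q => fcdMB q.1 q.2) := by
  have hcF : ∀ p ∈ (L.drop (L.length - S.length)).zip S, p.1 = p.2 ∨ p.1 = 1 ∨ p.2 = 1 := by
    intro p hp
    exact hc p (by rw [fcdZipRev L S hlen]; exact List.mem_reverse.mpr hp)
  rw [fcdMerge_long _ _ (by simp [hlen]), List.reverse_append]
  congr 1
  · simp only [List.length_reverse]
    rw [List.drop_reverse, List.reverse_reverse]
  · rw [fcdZipWithTrunc fcdM L.reverse S.reverse]
    simp only [List.length_reverse]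
    rw [List.take_reverse, ← List.reverse_zipWith (by simp; omega), List.reverse_reverse]
    rw [show (fun q : Int × Int => fcdMB q.1 q.2) = Function.uncurry fcdMB from rfl,
      List.map_uncurry_zip_eq_zipWith]
    apply List.zipWith_congr
    rw [List.forall₂_iff_zip]
    refine ⟨by simp; omega, ?_⟩
    intro a b hab
    have := hcF (a, b) hab
    unfold fcdM fcdMB
    rcases this with h' | h' | h' <;> split_ifs <;> simp_all

-- ===== VERDICT (by name: the statement is the Claim_ definition above) =====
theorem find_common_dimension_spec : Claim_equal_find_common_dimension := by
  intro dim_1 dim_2 _ hpre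
  unfold Spec_find_common_dimension find_common_dimension find_common_dimension_alt
  have hA := fcdLoopA_eq_merge dim_1.reverse dim_2.reverse
    (if dim_2.reverse.length > dim_1.reverse.length then dim_2.reverse.length
     else dim_1.reverse.length)
    0 [] (by split <;> omega) (by simp only [List.drop_zero]; exact hpre)
  simp only [List.drop_zero] at hA
  by_cases hlt : dim_1.length < dim_2.length
  · -- dim_2 is the longer list; B swaps
    have hlen : dim_1.length ≤ dim_2.length := by omega
    have hc2 : ∀ p ∈ dim_2.reverse.zip dim_1.reverse, p.1 = p.2 ∨ p.1 = 1 ∨ p.2 = 1 := by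
      intro p hp
      have : p.swap ∈ dim_1.reverse.zip dim_2.reverse := by
        rw [← List.zip_swap dim_2.reverse dim_1.reverse]
        exact List.mem_map_of_mem hp
      have := hpre p.swap this
      simp [Prod.swap] at this
      tauto
    have hcomm := fcdMerge_comm dim_1.reverse dim_2.reverse hpre
    have hB := fcdFoldB_eq ((dim_2.drop (dim_2.length - dim_1.length)).zip dim_1)
      (by intro p hp; exact hc2 p (by rw [fcdZipRev dim_2 dim_1 hlen]; exact List.mem_reverse.mpr hp)) []
    simp only [if_pos hlt, hA, hcomm, hB, List.nil_append]
    exact fcdBridge dim_2 dim_1 hlen hc2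
  · have hlen : dim_2.length ≤ dim_1.length := by omega
    have hB := fcdFoldB_eq ((dim_1.drop (dim_1.length - dim_2.length)).zip dim_2)
      (by intro p hp; exact hpre p (by rw [fcdZipRev dim_1 dim_2 hlen]; exact List.mem_reverse.mpr hp)) []
    simp only [if_neg hlt, hA, hB, List.nil_append]
    exact fcdBridge dim_1 dim_2 hlen hpre
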